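-- pv_equiv track=rewrite | github.com/mariajvieira/feup-ia-CakeSortPuzzle | src/models/board.py | _move_slices
-- ===== SOURCE A (Python) =====
-- def _move_slices(source_plate, target_plate, slice_type):
--     """Move fatias de um tipo específico de um prato para outro.
--
--     Args:
--         source_plate (list): Prato de origem.
--         target_plate (list): Prato de destino.
--         slice_type: Tipo de fatia a ser movida.
--
--     Returns:
--         tuple: (bool, int) - True se houve movimentação e o número de fatias movidas.
--     """
--     # Conta quantas fatias do tipo específico existem no prato de origem
--     slices_to_move = source_plate.count(slice_type)
--     if slices_to_move == 0:
--         return False, 0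
--
--     # Verifica se há espaço no prato de destino
--     empty_slots = target_plate.count(None)
--
--     # Se não houver espaços vazios, verifica se podemos fazer trocas
--     if empty_slots == 0:
--         # Verifica se o prato de destino já tem fatias do mesmo tipo
--         target_slices_of_type = target_plate.count(slice_type)
--         if target_slices_of_type > 0:
--             # Conta outros tipos de fatias no prato de destino
--             other_types = {}
--             for s in target_plate:
--                 if s is not None and s != slice_type:
--                     other_types[s] = other_types.get(s, 0) + 1
--
--             # Verifica se há espaço no prato de origem para receber outras fatias
--             source_empty_slots = source_plate.count(None)
--
--             # Se houver pelo menos um tipo diferente no prato de destino e espaço no prato de origem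
--             if other_types and source_empty_slots >= min(other_types.values()):
--                 # Escolhe o tipo com menor quantidade para mover para o prato de origem
--                 other_type = min(other_types, key=other_types.get)
--
--                 # Move as fatias do outro tipo para o prato de origem
--                 moved = False
--                 slices_moved = 0
--
--                 # Primeiro, move as fatias do outro tipo para o prato de origem
--                 for i in range(len(target_plate)):
--                     if target_plate[i] == other_type and source_empty_slots > 0:
--                         target_plate[i] = None
--
--                         # Adiciona a fatia ao prato de origem
--                         for j in range(len(source_plate)):
--                             if source_plate[j] is None:
--                                 source_plate[j] = other_type
--                                 break
--
--                         source_empty_slots -= 1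
--                         moved = True
--
--                 # Agora, move as fatias do tipo específico para o prato de destino
--                 empty_slots = target_plate.count(None)
--                 slices_to_move = min(slices_to_move, empty_slots)
--
--                 for i in range(len(source_plate)):
--                     if source_plate[i] == slice_type and slices_to_move > 0:
--                         source_plate[i] = None
--
--                         for j in range(len(target_plate)):
--                             if target_plate[j] is None:
--                                 target_plate[j] = slice_type
--                                 break
--
--                         slices_to_move -= 1
--                         slices_moved += 1
--                         moved = True
--
--                 return moved, slices_moved
--
--         return False, 0
--
--     # Limita o número de fatias a mover ao espaço disponível
--     slices_to_move = min(slices_to_move, empty_slots)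
--
--     # Move as fatias
--     moved = False
--     slices_moved = 0
--     for i in range(len(source_plate)):
--         if source_plate[i] == slice_type and slices_to_move > 0:
--             # Remove a fatia do prato de origem
--             source_plate[i] = None
--
--             # Adiciona a fatia ao prato de destino
--             for j in range(len(target_plate)):
--                 if target_plate[j] is None:
--                     target_plate[j] = slice_type
--                     break
--
--             slices_to_move -= 1
--             slices_moved += 1
--             moved = True
--
--     return moved, slices_moved
-- ===== SOURCE B (Python) =====
-- def _move_slices(source_plate, target_plate, slice_type):
--     """Closed-form re-implementation: compute the returned (moved, count) pair
--     directly from counts, without simulating the slot-by-slot moves.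
--     Note: unlike A, B does not mutate the plates; the equivalence is about the
--     return value only."""
--     cnt = source_plate.count(slice_type)
--     if cnt == 0:
--         return False, 0
--     empty = target_plate.count(None)
--     if empty > 0:
--         return True, min(cnt, empty)
--     # no empty slot: a swap is possible only if the target already holds the type
--     if slice_type not in target_plate:
--         return False, 0
--     others = [s for s in target_plate if s is not None and s != slice_type]
--     if not others:
--         return False, 0
--     m = min(others.count(s) for s in dict.fromkeys(others))
--     if source_plate.count(None) < m:
--         return False, 0
--     return True, min(cnt, m)
-- ===== Notes on version B (the rewrite author's own statement) =====
-- stated objective: simpler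
-- what changed: B replaces A's slot-by-slot simulation (nested loops that mutate both plates, with inner scans for the first empty slot) by a closed-form computation of the returned pair from counts alone: count of the type in the source, empty slots in the target, and in the full-target swap case the minimum multiplicity among the other types; B performs no mutation (the equivalence is about the return value).
import Mathlib
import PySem

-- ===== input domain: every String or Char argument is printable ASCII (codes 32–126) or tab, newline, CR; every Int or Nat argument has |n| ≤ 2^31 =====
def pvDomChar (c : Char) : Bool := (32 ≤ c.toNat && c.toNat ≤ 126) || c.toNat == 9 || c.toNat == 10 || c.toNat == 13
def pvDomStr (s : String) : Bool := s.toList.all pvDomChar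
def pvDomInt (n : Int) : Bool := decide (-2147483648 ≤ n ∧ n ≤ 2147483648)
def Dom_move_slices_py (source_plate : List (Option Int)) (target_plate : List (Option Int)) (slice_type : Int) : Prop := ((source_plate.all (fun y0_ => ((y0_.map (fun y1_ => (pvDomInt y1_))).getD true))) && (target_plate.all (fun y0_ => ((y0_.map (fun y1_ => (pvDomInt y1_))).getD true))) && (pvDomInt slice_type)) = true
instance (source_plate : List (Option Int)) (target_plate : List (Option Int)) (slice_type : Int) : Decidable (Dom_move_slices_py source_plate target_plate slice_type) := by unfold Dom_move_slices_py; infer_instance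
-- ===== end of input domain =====

-- B computes the returned pair in closed form from counts instead of simulating the
-- slot-by-slot moves; B does not mutate the plates (A does), so the equivalence proved
-- here is about the RETURN value only.

-- ===== PORT A =====

-- inner 'for j in range(len(...)): if ...[j] is None: ...[j] = v; break'
def pvSetFirstNone (xs : List (Option Int)) (v : Int) : List (Option Int) :=
  match xs with
  | [] => []
  | none :: rest => some v :: rest
  | x :: rest => x :: pvSetFirstNone rest v

-- A's first loop (swap branch): move other_type slices from target to source.
-- state: (rest of target, source, source_empty_slots, moved); returns (target', source', source_empty_slots', moved')
def pvLoop1 (tgt : List (Option Int)) (src : List (Option Int)) (ot : Int) (se : Int) (moved : Bool) :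
    List (Option Int) × List (Option Int) × Int × Bool :=
  match tgt with
  | [] => ([], src, se, moved)
  | x :: rest =>
    if x == some ot ∧ 0 < se then
      let r := pvLoop1 rest (pvSetFirstNone src ot) ot (se - 1) true
      (none :: r.1, r.2)
    else
      let r := pvLoop1 rest src ot se moved
      (x :: r.1, r.2)

-- A's main move loop: move slice_type slices from source to target.
-- returns (source', target', slices_to_move', slices_moved', moved')
def pvLoop2 (src : List (Option Int)) (tgt : List (Option Int)) (t : Int) (stm : Int) (sm : Int) (moved : Bool) :
    List (Option Int) × List (Option Int) × Int × Int × Bool :=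
  match src with
  | [] => ([], tgt, stm, sm, moved)
  | x :: rest =>
    if x == some t ∧ 0 < stm then
      let r := pvLoop2 rest (pvSetFirstNone tgt t) t (stm - 1) (sm + 1) true
      (none :: r.1, r.2)
    else
      let r := pvLoop2 rest tgt t stm sm moved
      (x :: r.1, r.2)

def move_slices_py (source_plate : List (Option Int)) (target_plate : List (Option Int)) (slice_type : Int) : Bool × Int :=
  let slices_to_move : Int := source_plate.count (some slice_type)
  if slices_to_move = 0 then (false, 0)
  else
    let empty_slots : Int := target_plate.count none
    if empty_slots = 0 then
      let target_slices_of_type : Int := target_plate.count (some slice_type)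
      if 0 < target_slices_of_type then
        -- other_types[s] = other_types.get(s, 0) + 1 over non-None, non-slice_type entries
        let other_types : PySem.Dict Int Int :=
          target_plate.foldl (fun d s =>
            match s with
            | some v => if v ≠ slice_type then d.insert v (d.getD v 0 + 1) else d
            | none => d) PySem.Dict.empty
        let source_empty_slots : Int := source_plate.count none
        if other_types.keys ≠ [] then        -- 'if other_types and ...' (short-circuit)
          match PySem.List.min? other_types.values (fun v => v) with
          | none => (false, 0)               -- unreachable: other_types nonempty
          | some mv =>
            if mv ≤ source_empty_slots then
              -- other_type = min(other_types, key=other_types.get); on keys .get = .getD k 0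
              match PySem.List.min? other_types.keys (fun k => other_types.getD k 0) with
              | none => (false, 0)           -- unreachable
              | some other_type =>
                let r1 := pvLoop1 target_plate source_plate other_type source_empty_slots false
                let empty_slots2 : Int := r1.1.count none
                let stm2 : Int := min slices_to_move empty_slots2
                let r2 := pvLoop2 r1.2.1 r1.1 slice_type stm2 0 r1.2.2.2
                (r2.2.2.2.2, r2.2.2.2.1)
            else (false, 0)
        else (false, 0)
      else (false, 0)
    else
      let stm : Int := min slices_to_move empty_slots
      let r := pvLoop2 source_plate target_plate slice_type stm 0 false
      (r.2.2.2.2, r.2.2.2.1)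

-- ===== PORT B =====
def move_slices_py_alt (source_plate : List (Option Int)) (target_plate : List (Option Int)) (slice_type : Int) : Bool × Int :=
  let cnt : Int := source_plate.count (some slice_type)
  if cnt = 0 then (false, 0)
  else
    let empty : Int := target_plate.count none
    if 0 < empty then (true, min cnt empty)
    else if ¬ target_plate.contains (some slice_type) then (false, 0)
    else
      let others := target_plate.filter (fun s => !(s == none) && !(s == some slice_type))
      if others = [] then (false, 0)
      else
        -- min(others.count(s) for s in dict.fromkeys(others))
        match PySem.List.min? ((PySem.List.dedup others).map (fun s => (others.count s : Int))) (fun x => x) with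
        | none => (false, 0)                 -- unreachable: others nonempty
        | some m =>
          if (source_plate.count none : Int) < m then (false, 0)
          else (true, min cnt m)

-- ===== PRECONDITION & SPEC =====
def Spec_move_slices_py (source_plate : List (Option Int)) (target_plate : List (Option Int)) (slice_type : Int) (out : Bool × Int) : Prop := out = move_slices_py_alt source_plate target_plate slice_type
instance (source_plate : List (Option Int)) (target_plate : List (Option Int)) (slice_type : Int) (out : Bool × Int) : Decidable (Spec_move_slices_py source_plate target_plate slice_type out) := by unfold Spec_move_slices_py; infer_instance

-- ===== CLAIM (what is proved, stated in full; the proofs are below) =====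
def Claim_equal_move_slices_py : Prop := ∀ (source_plate : List (Option Int)) (target_plate : List (Option Int)) (slice_type : Int), Dom_move_slices_py source_plate target_plate slice_type → Spec_move_slices_py source_plate target_plate slice_type (move_slices_py source_plate target_plate slice_type)

-- ===== LEMMAS AND PROOFS =====

-- non-None, non-slice_type values of the target, in order (proof-only helper)
def pvF (tgt : List (Option Int)) (t : Int) : List Int :=
  (tgt.filterMap (fun x => x)).filter (fun v => !(v == t))

theorem pvSetFirstNone_count (xs : List (Option Int)) (v w : Int) (h : w ≠ v) :
    (pvSetFirstNone xs v).count (some w) = xs.count (some w) := by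
  induction xs with
  | nil => rfl
  | cons x rest ih =>
    cases x with
    | none => simp [pvSetFirstNone, Ne.symm h]
    | some a => simp [pvSetFirstNone, List.count_cons, ih]

theorem pvLoop2_spec (t : Int) (xs : List (Option Int)) : ∀ (tgt : List (Option Int)) (stm sm : Int) (mv : Bool), 0 ≤ stm →
    ((pvLoop2 xs tgt t stm sm mv).2.2.2.1 = sm + min stm (xs.count (some t) : Int)) ∧
    ((pvLoop2 xs tgt t stm sm mv).2.2.2.2 = (mv || (decide (0 < stm) && decide (0 < xs.count (some t))))) := by
  induction xs with
  | nil => intro tgt stm sm mv h; simp [pvLoop2]; omega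
  | cons x rest ih =>
    intro tgt stm sm mv h
    by_cases hc : (x == some t) = true ∧ 0 < stm
    · have hx : x = some t := by simpa using hc.1
      simp only [pvLoop2, if_pos hc]
      obtain ⟨ih1, ih2⟩ := ih (pvSetFirstNone tgt t) (stm - 1) (sm + 1) true (by omega)
      constructor
      · rw [ih1]; subst hx; simp; omega
      · rw [ih2]; subst hx; simp
        exact Or.inr hc.2
    · simp only [pvLoop2, if_neg hc]
      obtain ⟨ih1, ih2⟩ := ih tgt stm sm mv h
      rcases Decidable.not_and_iff_or_not.mp hc with hx | hs
      · have hx' : ¬ x = some t := by simpa using hx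
        refine ⟨?_, ?_⟩
        · rw [ih1]; simp [hx']
        · rw [ih2]; simp [hx']
      · have hs0 : stm = 0 := by omega
        subst hs0
        refine ⟨?_, ?_⟩
        · rw [ih1]; omega
        · rw [ih2]; simp

theorem pvLoop1_spec (t ot : Int) (hot : ot ≠ t) (tgt : List (Option Int)) : ∀ (src : List (Option Int)) (se : Int) (mv : Bool),
    ((tgt.count (some ot) : Int)) ≤ se →
    ((pvLoop1 tgt src ot se mv).1.count none = tgt.count none + tgt.count (some ot)) ∧
    ((pvLoop1 tgt src ot se mv).2.1.count (some t) = src.count (some t)) ∧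
    ((pvLoop1 tgt src ot se mv).2.2.2 = (mv || decide (0 < tgt.count (some ot)))) := by
  induction tgt with
  | nil => intro src se mv h; simp [pvLoop1]
  | cons x rest ih =>
    intro src se mv h
    by_cases hc : (x == some ot) = true ∧ 0 < se
    · have hx : x = some ot := by simpa using hc.1
      simp only [pvLoop1, if_pos hc]
      have hcount : ((rest.count (some ot) : Int)) ≤ se - 1 := by
        subst hx; simp at h; omega
      obtain ⟨ih1, ih2, ih3⟩ := ih (pvSetFirstNone src ot) (se - 1) true hcount
      refine ⟨?_, ?_, ?_⟩
      · rw [List.count_cons, ih1]; subst hx; simp; omega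
      · rw [ih2, pvSetFirstNone_count src ot t (Ne.symm hot)]
      · rw [ih3]; subst hx; simp
    · simp only [pvLoop1, if_neg hc]
      have hx : ¬ x = some ot := by
        intro hxx
        subst hxx
        simp at h
        exact hc ⟨by simp, by omega⟩
      have hcount : ((rest.count (some ot) : Int)) ≤ se := by
        simp [hx] at h ⊢; omega
      obtain ⟨ih1, ih2, ih3⟩ := ih src se mv hcount
      refine ⟨?_, ?_, ?_⟩
      · rw [List.count_cons, ih1]; simp [List.count_cons, hx]; omega
      · rw [ih2]
      · rw [ih3]; simp [hx]

theorem pvFold_eq (t : Int) (tgt : List (Option Int)) : ∀ (d : PySem.Dict Int Int),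
    tgt.foldl (fun d s => match s with
      | some v => if v ≠ t then d.insert v (d.getD v 0 + 1) else d
      | none => d) d
    = (pvF tgt t).foldl (fun d x => d.insert x (d.getD x 0 + 1)) d := by
  induction tgt with
  | nil => intro d; rfl
  | cons x rest ih =>
    intro d
    cases x with
    | none => simpa [pvF, List.filterMap_cons] using ih d
    | some v =>
      by_cases hv : v = t
      · subst hv; simpa [pvF, List.filterMap_cons] using ih d
      · simpa [pvF, List.filterMap_cons, hv] using ih (d.insert v (d.getD v 0 + 1))

theorem pvOthers_eq (t : Int) (tgt : List (Option Int)) :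
    tgt.filter (fun s => !(s == none) && !(s == some t)) = (pvF tgt t).map some := by
  induction tgt with
  | nil => rfl
  | cons x rest ih =>
    cases x with
    | none => simpa [pvF, List.filterMap_cons] using ih
    | some v =>
      by_cases hv : v = t
      · subst hv; simpa [pvF, List.filterMap_cons] using ih
      · simp [pvF, hv] at ih ⊢; exact ih

theorem count_filterMap_id (xs : List (Option Int)) (v : Int) : (xs.filterMap (fun x => x)).count v = xs.count (some v) := by
  induction xs with
  | nil => rfl
  | cons x xs ih =>
    cases x <;> simp [List.count_cons, ih]

theorem pvCount_pvF (t v : Int) (h : ¬ v = t) (tgt : List (Option Int)) :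
    (pvF tgt t).count v = tgt.count (some v) := by
  rw [pvF, List.count_filter (by simp [h]), count_filterMap_id]

theorem discard_map_some (s : List Int) (x : Int) :
    PySem.Set.discard (s.map some) (some x) = (PySem.Set.discard s x).map some := by
  simp only [PySem.Set.discard, List.filter_map]
  congr 1

theorem ofList_map_some (xs : List Int) :
    PySem.Set.ofList (xs.map some) = (PySem.Set.ofList xs).map some := by
  induction xs with
  | nil => simp [PySem.Set.ofList_nil]
  | cons x xs ih => simp [PySem.Set.ofList_cons, ih, discard_map_some]

theorem ofList_eq_nil_iff (xs : List Int) : PySem.Set.ofList xs = [] ↔ xs = [] := by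
  induction xs with
  | nil => simp [PySem.Set.ofList_nil]
  | cons x xs ih => simp [PySem.Set.ofList_cons]

theorem values_counter (xs : List Int) :
    (PySem.Dict.counter xs).values = (PySem.Set.ofList xs).map (fun k => ((xs.count k : Int))) := by
  simp [PySem.Dict.values, PySem.Dict.items_counter, List.map_map]

theorem move_slices_eq (source_plate target_plate : List (Option Int)) (slice_type : Int) :
    move_slices_py source_plate target_plate slice_type = move_slices_py_alt source_plate target_plate slice_type := by
  set s := source_plate
  set tgt := target_plate
  set t := slice_type
  by_cases h1 : ((s.count (some t) : Int)) = 0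
  · simp [move_slices_py, move_slices_py_alt, h1]
  · have hcnt : 0 < s.count (some t) := by
      rcases Nat.eq_zero_or_pos (s.count (some t)) with h | h
      · exact absurd (by exact_mod_cast h) h1
      · exact h
    by_cases h2 : ((tgt.count none : Int)) = 0
    · have hnpos : ¬ (0 : Int) < (tgt.count none : Int) := by omega
      simp only [move_slices_py, move_slices_py_alt, if_neg h1, if_pos h2, if_neg hnpos]
      by_cases h3 : (0 : Int) < (tgt.count (some t) : Int)
      · have hmem : some t ∈ tgt := by
          rw [← List.count_pos_iff]
          exact_mod_cast h3
        rw [if_pos h3, if_neg (show ¬ ¬ tgt.contains (some t) = true by simp [hmem])]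
        have hd : (tgt.foldl (fun d s => match s with
            | some v => if v ≠ t then d.insert v (d.getD v 0 + 1) else d
            | none => d) (PySem.Dict.empty : PySem.Dict Int Int)) = PySem.Dict.counter (pvF tgt t) := by
          rw [pvFold_eq]
          exact PySem.Dict.foldl_insert_getD_add_one_eq_counter _
        rw [hd, pvOthers_eq, PySem.Dict.keys_counter, values_counter]
        simp only [PySem.List.dedup_eq_ofList, ofList_map_some, List.map_map, Function.comp_def,
          List.count_map_of_injective _ some (Option.some_injective _), PySem.Dict.getD_counter]
        by_cases hF : pvF tgt t = []
        · simp [hF, PySem.Set.ofList_nil]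
        · have hS : PySem.Set.ofList (pvF tgt t) ≠ [] := by
            rw [Ne, ofList_eq_nil_iff]; exact hF
          rw [if_pos hS, if_neg (show ¬ (pvF tgt t).map some = [] by simpa using hF)]
          cases hmin : PySem.List.min? ((PySem.Set.ofList (pvF tgt t)).map (fun k => ((pvF tgt t).count k : Int))) (fun v => v) with
          | none =>
            exact absurd (List.map_eq_nil_iff.mp ((PySem.List.min?_eq_none_iff _ _).mp hmin)) hS
          | some mv =>
            simp only []
            by_cases h4 : mv ≤ ((s.count none : Int))
            · rw [if_pos h4, if_neg (show ¬ ((s.count none : Int)) < mv by omega)]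
              cases hk : PySem.List.min? (PySem.Set.ofList (pvF tgt t)) (fun k => ((pvF tgt t).count k : Int)) with
              | none =>
                exact absurd ((PySem.List.min?_eq_none_iff _ _).mp hk) hS
              | some ot =>
                simp only []
                have hotS : ot ∈ PySem.Set.ofList (pvF tgt t) := PySem.List.min?_mem hk
                have hotF : ot ∈ pvF tgt t := (PySem.Set.mem_ofList _ _).mp hotS
                have hotne : ¬ ot = t := by
                  have hmf := List.mem_filter.mp hotF
                  simpa using hmf.2
                have hmvL := PySem.List.min?_mem hmin
                obtain ⟨k0, hk0S, hk0⟩ := List.mem_map.mp hmvL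
                have hub : mv ≤ (((pvF tgt t).count ot : Int)) := by
                  have := PySem.List.min?_isMin hmin (((pvF tgt t).count ot : Int))
                    (List.mem_map_of_mem hotS)
                  simpa using this
                have hlb : (((pvF tgt t).count ot : Int)) ≤ mv := by
                  have := PySem.List.min?_isMin hk k0 hk0S
                  simpa [hk0] using this
                have hmv_eq : (((pvF tgt t).count ot : Int)) = mv := le_antisymm hlb hub
                have h1le : 0 < (pvF tgt t).count ot := List.count_pos_iff.mpr hotF
                have htc : tgt.count (some ot) = (pvF tgt t).count ot :=
                  (pvCount_pvF t ot hotne tgt).symm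
                obtain ⟨c1, c2, c3⟩ := pvLoop1_spec t ot hotne tgt s ((s.count none : Int)) false
                  (by rw [htc]; omega)
                obtain ⟨l1, l2⟩ := pvLoop2_spec t
                  (pvLoop1 tgt s ot ((s.count none : Int)) false).2.1
                  (pvLoop1 tgt s ot ((s.count none : Int)) false).1
                  (min ((s.count (some t) : Int)) (((pvLoop1 tgt s ot ((s.count none : Int)) false).1.count none : Int)))
                  0
                  (pvLoop1 tgt s ot ((s.count none : Int)) false).2.2.2
                  (by
                    have : (0:Int) ≤ ((s.count (some t) : Int)) := by positivity
                    have : (0:Int) ≤ (((pvLoop1 tgt s ot ((s.count none : Int)) false).1.count none : Int)) := by positivity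
                    omega)
                rw [l1, l2, c1, c2, c3]
                refine Prod.ext ?_ ?_
                · simp only []
                  have hpos1 : 0 < tgt.count (some ot) := by omega
                  simp [hpos1]
                · simp only []
                  have h20 : tgt.count none = 0 := by exact_mod_cast h2
                  rw [h20]
                  push_cast
                  omega
            · rw [if_neg h4, if_pos (show ((s.count none : Int)) < mv by omega)]
      · have hnmem : some t ∉ tgt := by
          rw [← List.count_pos_iff]
          omega
        rw [if_neg h3, if_pos (show ¬ tgt.contains (some t) = true by simp [hnmem])]
    · have hpos : (0 : Int) < (tgt.count none : Int) := by
        have : 0 < tgt.count none := by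
          rcases Nat.eq_zero_or_pos (tgt.count none) with h | h
          · exact absurd (by exact_mod_cast h) h2
          · exact h
        exact_mod_cast this
      simp only [move_slices_py, move_slices_py_alt, if_neg h1, if_neg h2, if_pos hpos]
      obtain ⟨l1, l2⟩ := pvLoop2_spec t s tgt (min ((s.count (some t) : Int)) ((tgt.count none : Int))) 0 false (by omega)
      rw [l1, l2]
      refine Prod.ext ?_ ?_
      · simp only []
        have : (0:Int) < min ((s.count (some t) : Int)) ((tgt.count none : Int)) := by omega
        simp [this, hcnt]
      · simp only []
        omega

-- ===== VERDICT (by name: the statement is the Claim_ definition above) =====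
theorem move_slices_py_spec : Claim_equal_move_slices_py := by
  intro s tgt t _
  unfold Spec_move_slices_py
  exact move_slices_eq s tgt t
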